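-- pv_equiv track=rewrite | github.com/MUSTEC-Ltd/campuscloud | Phase 2/groups/compute.py | pick_scale_down_candidates
-- ===== SOURCE A (Python) =====
-- def pick_scale_down_candidates(items):
--     stopped = []
--     running_like = []
--     for item in items:
--         if item["status"] == "stopped":
--             stopped.append(item)
--         else:
--             running_like.append(item)
--     return stopped + running_like
-- ===== SOURCE B (Python) =====
-- def pick_scale_down_candidates(items):
--     # Stable sort by a boolean key: stopped -> False (0) sorts first,
--     # everything else -> True (1) follows; Timsort stability preserves
--     # the original relative order inside each group.
--     return sorted(items, key=lambda it: it["status"] != "stopped")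
-- ===== Notes on version B (the rewrite author's own statement) =====
-- stated objective: idiomatic
-- what changed: Replaced the explicit two-bucket partition loop with a single stable sort on the boolean key status != 'stopped', whose stability reproduces the stopped-first order exactly.
import Mathlib
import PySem

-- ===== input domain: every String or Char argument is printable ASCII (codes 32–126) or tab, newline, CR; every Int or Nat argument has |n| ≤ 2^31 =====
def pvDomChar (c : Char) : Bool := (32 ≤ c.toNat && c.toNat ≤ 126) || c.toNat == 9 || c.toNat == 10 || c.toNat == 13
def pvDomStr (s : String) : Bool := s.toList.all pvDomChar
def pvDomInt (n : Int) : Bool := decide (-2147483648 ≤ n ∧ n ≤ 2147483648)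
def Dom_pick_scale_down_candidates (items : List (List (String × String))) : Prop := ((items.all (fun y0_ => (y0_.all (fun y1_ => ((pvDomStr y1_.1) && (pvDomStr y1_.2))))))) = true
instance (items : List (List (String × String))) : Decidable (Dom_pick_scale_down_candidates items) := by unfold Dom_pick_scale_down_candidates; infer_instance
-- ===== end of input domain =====

-- B replaces A's explicit two-bucket partition loop with one stable sort on the
-- boolean key status != "stopped" (same result, different mechanism).

-- item["status"] — first-match dict lookup; total form, used only under Pre_ (key present)
def pvStatus (item : List (String × String)) : String :=
  PySem.Dict.getD (PySem.Dict.mk item) "status" ""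

-- ===== PORT A =====
def pick_scale_down_candidates (items : List (List (String × String))) : List (List (String × String)) :=
  let p := items.foldl
    (fun (acc : List (List (String × String)) × List (List (String × String))) item =>
      if pvStatus item == "stopped" then (acc.1 ++ [item], acc.2) else (acc.1, acc.2 ++ [item]))
    ([], [])
  p.1 ++ p.2

-- ===== PORT B =====
-- Python's bool key (False < True) is ported as Int 0/1.
def pick_scale_down_candidates_alt (items : List (List (String × String))) : List (List (String × String)) :=
  PySem.List.sorted items (fun it => if pvStatus it == "stopped" then (0 : Int) else 1) false

-- ===== PRECONDITION & SPEC =====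
-- Pre_ excludes items missing the "status" key, on which the Python raises KeyError.
def Pre_pick_scale_down_candidates (items : List (List (String × String))) : Prop :=
  (items.all (fun it => it.any (fun kv => kv.1 == "status"))) = true
instance (items : List (List (String × String))) : Decidable (Pre_pick_scale_down_candidates items) := by unfold Pre_pick_scale_down_candidates; infer_instance
def pvWitness_pick_scale_down_candidates : (List (List (String × String))) :=
  [[("status", "running")], [("status", "stopped")], [("status", "stopped"), ("id", "x")]]

def Spec_pick_scale_down_candidates (items : List (List (String × String))) (out : List (List (String × String))) : Prop := out = pick_scale_down_candidates_alt items
instance (items : List (List (String × String))) (out : List (List (String × String))) : Decidable (Spec_pick_scale_down_candidates items out) := by unfold Spec_pick_scale_down_candidates; infer_instance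

-- ===== CLAIM (what is proved, stated in full; the proofs are below) =====
def Claim_equal_pick_scale_down_candidates : Prop := ∀ (items : List (List (String × String))), Dom_pick_scale_down_candidates items → Pre_pick_scale_down_candidates items → Spec_pick_scale_down_candidates items (pick_scale_down_candidates items)

-- ===== LEMMAS AND PROOFS =====

-- insertBy skips a prefix on which the comparison never says "before"
theorem insertBy_append_of_forall_not {α : Type} (b : α → α → Bool) (x : α)
    (F R : List α) (h : ∀ y ∈ F, b x y = false) :
    PySem.List.insertBy b x (F ++ R) = F ++ PySem.List.insertBy b x R := by
  induction F with
  | nil => rfl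
  | cons f fs ih =>
    have hf := h f (by simp)
    simp only [List.cons_append, PySem.List.insertBy, hf]
    simp [ih (fun y hy => h y (by simp [hy]))]

-- the stable insertion-sort fold with a 0/1 key IS the stable partition
theorem sorted_binary_key_partition (p : List (String × String) → Bool)
    (xs F R : List (List (String × String)))
    (hF : ∀ y ∈ F, p y = true) (hR : ∀ y ∈ R, p y = false) :
    xs.foldl (fun acc x =>
        PySem.List.insertBy
          (fun a b => decide ((if p a then (0 : Int) else 1) < (if p b then (0 : Int) else 1)))
          x acc) (F ++ R)
      = (F ++ xs.filter p) ++ (R ++ xs.filter (fun x => !p x)) := by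
  induction xs generalizing F R with
  | nil => simp
  | cons x xs ih =>
    simp only [List.foldl_cons]
    by_cases hp : p x = true
    · have hskip : ∀ y ∈ F, (fun a b => decide ((if p a then (0 : Int) else 1) < (if p b then (0 : Int) else 1))) x y = false := by
        intro y hy; simp [hp, hF y hy]
      rw [insertBy_append_of_forall_not _ _ _ _ hskip]
      have hins : PySem.List.insertBy
          (fun a b => decide ((if p a then (0 : Int) else 1) < (if p b then (0 : Int) else 1))) x R
          = x :: R := by
        cases R with
        | nil => rfl
        | cons r rs =>
          have hr := hR r (by simp)
          simp [PySem.List.insertBy, hp, hr]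
      rw [hins]
      have : F ++ x :: R = (F ++ [x]) ++ R := by simp
      rw [this, ih (F ++ [x]) R (by intro y hy; rcases List.mem_append.mp hy with h | h
                                    · exact hF y h
                                    · simp at h; subst h; exact hp) hR]
      simp [hp]
    · have hnone : ∀ y ∈ F ++ R, (fun a b => decide ((if p a then (0 : Int) else 1) < (if p b then (0 : Int) else 1))) x y = false := by
        intro y _; by_cases hy : p y <;> simp [hp, hy]
      rw [PySem.List.insertBy_of_forall_not_before _ _ _ hnone]
      have : (F ++ R) ++ [x] = F ++ (R ++ [x]) := by simp
      rw [this, ih F (R ++ [x]) hF (by intro y hy; rcases List.mem_append.mp hy with h | h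
                                       · exact hR y h
                                       · simp at h; subst h; simpa using hp)]
      simp [hp]

-- A's two-accumulator loop, characterised: the buckets are the two filters
theorem A_fold_eq (xs : List (List (String × String)))
    (s r : List (List (String × String))) :
    xs.foldl (fun acc item =>
        if pvStatus item == "stopped" then (acc.1 ++ [item], acc.2) else (acc.1, acc.2 ++ [item]))
      (s, r)
    = (s ++ xs.filter (fun it => pvStatus it == "stopped"),
       r ++ xs.filter (fun it => !(pvStatus it == "stopped"))) := by
  induction xs generalizing s r with
  | nil => simp
  | cons x xs ih =>
    rw [List.foldl_cons]
    by_cases h : (pvStatus x == "stopped") = true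
    · rw [if_pos h, ih]; simp [h]
    · rw [if_neg h, ih]; simp [h]

-- ===== VERDICT (by name: the statement is the Claim_ definition above) =====
theorem pick_scale_down_candidates_spec : Claim_equal_pick_scale_down_candidates := by
  intro items _ _
  unfold Spec_pick_scale_down_candidates pick_scale_down_candidates pick_scale_down_candidates_alt
  rw [PySem.List.sorted_eq_foldl_insertBy]
  have hB := sorted_binary_key_partition (fun item => pvStatus item == "stopped") items [] []
    (by simp) (by simp)
  simp only [List.nil_append] at hB
  simp only [A_fold_eq, List.nil_append]
  exact hB.symm
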